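-- pv_equiv track=rewrite | github.com/mbrzezawski/LogicFormulaReducer | logicformulareducer.py | lacz
-- ===== SOURCE A (Python) =====
-- def lacz(s1,s2):
--   lr = 0
--   w = ""
--   for i in range(len(s1)):
--     if s1[i]==s2[i]:
--       w+=s1[i]
--     else:
--       w+='-'
--       lr+=1
--   if lr==1: return w
--   return None
-- ===== SOURCE B (Python) =====
-- def lacz(s1, s2):
--     diffs = [i for i in range(len(s1)) if s1[i] != s2[i]]
--     if len(diffs) == 1:
--         j = diffs[0]
--         return s1[:j] + '-' + s1[j+1:]
--     return None
-- ===== Notes on version B (the rewrite author's own statement) =====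
-- stated objective: simpler
-- what changed: Instead of accumulating a marked copy of the string character by character alongside a mismatch counter, B collects only the list of differing indices and, when exactly one index j exists, builds the result once by slicing: s1[:j] + '-' + s1[j+1:].
import Mathlib
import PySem

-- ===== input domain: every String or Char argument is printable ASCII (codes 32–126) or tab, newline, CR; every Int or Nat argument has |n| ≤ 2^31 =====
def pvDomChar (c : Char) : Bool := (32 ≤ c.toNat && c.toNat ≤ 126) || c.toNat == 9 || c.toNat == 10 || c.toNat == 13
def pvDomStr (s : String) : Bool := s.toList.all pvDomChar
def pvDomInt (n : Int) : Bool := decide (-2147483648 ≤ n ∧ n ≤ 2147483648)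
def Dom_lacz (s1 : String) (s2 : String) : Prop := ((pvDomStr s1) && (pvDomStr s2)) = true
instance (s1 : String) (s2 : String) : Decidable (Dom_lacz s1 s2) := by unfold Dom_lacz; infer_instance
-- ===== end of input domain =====

-- B collects only the list of differing indices and, when there is exactly one, rebuilds
-- the answer by slicing s1 around it, instead of A's char-by-char marked copy. (simpler)


-- ===== PORT A =====
-- for i in range(len(s1)): accumulate (lr, w); s1[i]/s2[i] via PySem.List.pyGet? on the
-- char lists (Pre_ makes both lookups succeed; outside Pre_ Python raises IndexError).
def lacz (s1 : String) (s2 : String) : Option String :=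
  let l1 := s1.toList
  let l2 := s2.toList
  let st := (PySem.List.pyRange 0 (l1.length : Int) 1).foldl
    (fun (acc : Int × List Char) i =>
      if PySem.List.pyGet? l1 i = PySem.List.pyGet? l2 i then
        (acc.1, acc.2 ++ [PySem.List.pyGetD l1 i ' '])
      else
        (acc.1 + 1, acc.2 ++ ['-']))
    (0, [])
  if st.1 = 1 then some (String.ofList st.2) else none

-- ===== PORT B =====
-- one pass collecting the differing indices; then a single slice-based rebuild s1[:j] + '-' + s1[j+1:].
def lacz_alt (s1 : String) (s2 : String) : Option String :=
  let l1 := s1.toList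
  let l2 := s2.toList
  let diffs := (PySem.List.pyRange 0 (l1.length : Int) 1).foldl
    (fun (acc : List Int) i =>
      if PySem.List.pyGet? l1 i ≠ PySem.List.pyGet? l2 i then acc ++ [i] else acc)
    []
  match diffs with
  | [j] => some (String.ofList (PySem.List.slice l1 none (some j) ++ ['-']
                 ++ PySem.List.slice l1 (some (j + 1)) none))
  | _ => none

-- ===== PRECONDITION & SPEC =====
-- Pre_ excludes exactly the inputs with len(s2) < len(s1), on which A (and B too) raises IndexError.
def Pre_lacz (s1 : String) (s2 : String) : Prop := s1.toList.length ≤ s2.toList.length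
instance (s1 : String) (s2 : String) : Decidable (Pre_lacz s1 s2) := by unfold Pre_lacz; infer_instance
def pvWitness_lacz : String × String := ("abc", "abd")

def Spec_lacz (s1 : String) (s2 : String) (out : Option String) : Prop := out = lacz_alt s1 s2
instance (s1 : String) (s2 : String) (out : Option String) : Decidable (Spec_lacz s1 s2 out) := by unfold Spec_lacz; infer_instance

-- ===== CLAIM (what is proved, stated in full; the proofs are below) =====
def Claim_equal_lacz : Prop := ∀ (s1 : String) (s2 : String), Dom_lacz s1 s2 → Pre_lacz s1 s2 → Spec_lacz s1 s2 (lacz s1 s2)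

-- ===== LEMMAS AND PROOFS =====

-- the common branch condition on an in-range index i: position i differs
def pvDiff (l1 l2 : List Char) (i : Nat) : Bool := l1.getD i ' ' != l2.getD i ' '

-- A's loop state after scanning the first m indices: the mismatch count and the marked copy
lemma foldA_eq (l1 l2 : List Char) (m : Nat) (hm : m ≤ l1.length) (h : l1.length ≤ l2.length) :
    (PySem.List.pyRange 0 (m : Int) 1).foldl
      (fun (acc : Int × List Char) i =>
        if PySem.List.pyGet? l1 i = PySem.List.pyGet? l2 i then
          (acc.1, acc.2 ++ [PySem.List.pyGetD l1 i ' '])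
        else
          (acc.1 + 1, acc.2 ++ ['-'])) (0, []) =
    (((List.range m).countP (pvDiff l1 l2) : Int),
      (List.range m).map (fun i => if pvDiff l1 l2 i then '-' else l1.getD i ' ')) := by
  induction m with
  | zero => simp [pysem]
  | succ k ih =>
    rw [show ((k+1 : Nat) : Int) = (k : Int) + 1 by push_cast; ring,
        PySem.List.pyRange_one_succ_right (by positivity), List.foldl_append,
        ih (by omega), List.range_succ]
    have h1 : k < l1.length := by omega
    have h2 : k < l2.length := by omega
    have e1 : PySem.List.pyGet? l1 (k : Int) = some l1[k] := by
      simp [pysem, List.getElem?_eq_getElem h1]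
    have e2 : PySem.List.pyGet? l2 (k : Int) = some l2[k] := by
      simp [pysem, List.getElem?_eq_getElem h2]
    have e3 : PySem.List.pyGetD l1 (k : Int) ' ' = l1[k] := by
      simp [pysem, List.getElem?_eq_getElem h1]
    have e4 : pvDiff l1 l2 k = (l1[k] != l2[k]) := by
      simp [pvDiff, List.getElem?_eq_getElem h1, List.getElem?_eq_getElem h2]
    simp only [List.foldl_cons, List.foldl_nil, e1, e2, e3, e4, List.countP_append,
      List.map_append, List.map_cons, List.map_nil, List.countP_cons, List.countP_nil]
    by_cases hc : l1[k] = l2[k] <;> simp [hc, List.getElem?_eq_getElem h1]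

-- B's loop state after scanning the first m indices: the differing indices, in order
lemma foldB_eq (l1 l2 : List Char) (m : Nat) (hm : m ≤ l1.length) (h : l1.length ≤ l2.length) :
    (PySem.List.pyRange 0 (m : Int) 1).foldl
      (fun (acc : List Int) i =>
        if PySem.List.pyGet? l1 i ≠ PySem.List.pyGet? l2 i then acc ++ [i] else acc) [] =
    ((List.range m).filter (pvDiff l1 l2)).map (fun i => (i : Int)) := by
  induction m with
  | zero => rw [show ((0:Nat):Int) = 0 by rfl, PySem.List.pyRange_one_eq_nil (by omega)]; rfl
  | succ k ih =>
    rw [show ((k+1 : Nat) : Int) = (k : Int) + 1 by push_cast; ring,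
        PySem.List.pyRange_one_succ_right (by positivity), List.foldl_append,
        ih (by omega), List.range_succ]
    have h1 : k < l1.length := by omega
    have h2 : k < l2.length := by omega
    have e1 : PySem.List.pyGet? l1 (k : Int) = some l1[k] := by
      simp [pysem, List.getElem?_eq_getElem h1]
    have e2 : PySem.List.pyGet? l2 (k : Int) = some l2[k] := by
      simp [pysem, List.getElem?_eq_getElem h2]
    have e4 : pvDiff l1 l2 k = (l1[k] != l2[k]) := by
      simp [pvDiff, List.getElem?_eq_getElem h1, List.getElem?_eq_getElem h2]
    simp only [List.foldl_cons, List.foldl_nil, e1, e2, e4, List.filter_append,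
      List.filter_cons, List.filter_nil]
    by_cases hc : l1[k] = l2[k] <;> simp [hc]

-- with a unique differing index j, A's marked copy is s1 with position j overwritten by '-'
lemma mask_eq_splice (l1 l2 : List Char) (j : Nat) (hj : j < l1.length)
    (huniq : ∀ i < l1.length, pvDiff l1 l2 i = true → i = j) (hdj : pvDiff l1 l2 j = true) :
    (List.range l1.length).map (fun i => if pvDiff l1 l2 i then '-' else l1.getD i ' ') =
    l1.take j ++ '-' :: l1.drop (j + 1) := by
  have hlen : (l1.take j).length = j := by simp [Nat.min_eq_left (le_of_lt hj)]
  apply List.ext_getElem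
  · simp; omega
  · intro i hi1 hi2
    simp only [List.length_map, List.length_range] at hi1
    rw [List.getElem_map, List.getElem_range]
    rcases lt_trichotomy i j with hij | rfl | hij
    · have hf : pvDiff l1 l2 i = false := by
        by_contra hcon
        have := huniq i hi1 (by simpa using hcon); omega
      rw [List.getElem_append_left (by omega)]
      simp [hf, List.getElem?_eq_getElem hi1, List.getElem_take]
    · rw [List.getElem_append_right (by omega)]
      simp [hdj, hlen]
    · have hf : pvDiff l1 l2 i = false := by
        by_contra hcon
        have := huniq i hi1 (by simpa using hcon); omega
      have h9 : (l1.take j ++ '-' :: l1.drop (j + 1))[i]? = some l1[i] := by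
        rw [List.getElem?_append_right (by omega), hlen,
            show i - j = (i - j - 1) + 1 by omega, List.getElem?_cons_succ,
            List.getElem?_drop, show j + 1 + (i - j - 1) = i by omega,
            List.getElem?_eq_getElem hi1]
      have h8 : (l1.take j ++ '-' :: l1.drop (j + 1))[i] = l1[i] := by
        have h7 := List.getElem?_eq_getElem hi2
        rw [h9] at h7
        exact (Option.some.inj h7).symm
      rw [h8]
      simp [hf, List.getElem?_eq_getElem hi1]

-- the two ports agree whenever s2 is long enough
lemma lacz_eq_alt (s1 s2 : String) (hpre : s1.toList.length ≤ s2.toList.length) :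
    lacz s1 s2 = lacz_alt s1 s2 := by
  unfold lacz lacz_alt
  simp only
  rw [foldA_eq s1.toList s2.toList s1.toList.length (le_refl _) hpre,
      foldB_eq s1.toList s2.toList s1.toList.length (le_refl _) hpre]
  set l1 := s1.toList with hl1
  set l2 := s2.toList with hl2
  have hc : (List.range l1.length).countP (pvDiff l1 l2) =
      ((List.range l1.length).filter (pvDiff l1 l2)).length := List.countP_eq_length_filter
  rcases hF : (List.range l1.length).filter (pvDiff l1 l2) with _ | ⟨j0, rest⟩
  · rw [hc, hF]
    simp
  · rcases rest with _ | ⟨j1, rest'⟩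
    · -- exactly one differing index j0
      have hmem : j0 ∈ (List.range l1.length).filter (pvDiff l1 l2) := by rw [hF]; simp
      have hj0 : j0 < l1.length := by
        have := List.mem_filter.mp hmem
        simpa using this.1
      have hdj : pvDiff l1 l2 j0 = true := (List.mem_filter.mp hmem).2
      have huniq : ∀ i < l1.length, pvDiff l1 l2 i = true → i = j0 := by
        intro i hi hp
        have : i ∈ (List.range l1.length).filter (pvDiff l1 l2) :=
          List.mem_filter.mpr ⟨by simpa using hi, hp⟩
        rw [hF] at this
        simpa using this
      rw [hc, hF]
      simp only [List.length_cons, List.length_nil]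
      rw [if_pos (by norm_num)]
      show _ = some (String.ofList (PySem.List.slice l1 none (some (j0 : Int)) ++ ['-']
        ++ PySem.List.slice l1 (some ((j0 : Int) + 1)) none))
      rw [PySem.List.slice_to l1 (b := (j0 : Int)) (by omega),
          PySem.List.slice_from l1 (a := (j0 : Int) + 1) (by omega)]
      rw [mask_eq_splice l1 l2 j0 hj0 huniq hdj]
      rw [show ((j0 : Int)).toNat = j0 by omega, show ((j0 : Int) + 1).toNat = j0 + 1 by omega]
      simp
    · rw [hc, hF]
      simp only [List.length_cons]
      rw [if_neg (by push_cast; omega)]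
      rfl

-- ===== VERDICT (by name: the statement is the Claim_ definition above) =====
theorem lacz_spec : Claim_equal_lacz := by
  intro s1 s2 _ hpre
  exact lacz_eq_alt s1 s2 hpre
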